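-- pv_equiv track=rewrite | github.com/JogFeelingVI/MuxsX | modex/core.py | style
-- ===== SOURCE A (Python) =====
-- from typing import List, Union
--
-- def style(msg: Union[str, int, float],
--           mt: int = None,
--           fc: int = None,
--           bg: int = None) -> str:
--     fmat = '\033[{code}{msg}\033[0m'
--     switch = {0: '', 1: '{}m', 2: '{};{}m', 3: '{};{};{}m'}
--
--     code = [x for x in [mt, fc, bg] if x != None and x != 0]
--     code_len = code.__len__()
--     code_f = switch.get(code_len).format(*code)
--     msg = f'{msg}'
--     return fmat.format(code=code_f, msg=msg)
-- ===== SOURCE B (Python) =====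
-- def style(msg, mt=None, fc=None, bg=None):
--     # Single accumulator pass over the three codes: no dispatch table, no list build.
--     parts = ''
--     for x in (mt, fc, bg):
--         if x is not None and x != 0:
--             parts += (';' if parts else '') + str(x)
--     code_f = parts + 'm' if parts else ''
--     return f'\033[{code_f}{msg}\033[0m'
-- ===== Notes on version B (the rewrite author's own statement) =====
-- stated objective: simpler
-- what changed: Replaces A's length-keyed template table and intermediate code list with a single string accumulator that appends each active code (with a ';' separator) while scanning the three options once.
import Mathlib
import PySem

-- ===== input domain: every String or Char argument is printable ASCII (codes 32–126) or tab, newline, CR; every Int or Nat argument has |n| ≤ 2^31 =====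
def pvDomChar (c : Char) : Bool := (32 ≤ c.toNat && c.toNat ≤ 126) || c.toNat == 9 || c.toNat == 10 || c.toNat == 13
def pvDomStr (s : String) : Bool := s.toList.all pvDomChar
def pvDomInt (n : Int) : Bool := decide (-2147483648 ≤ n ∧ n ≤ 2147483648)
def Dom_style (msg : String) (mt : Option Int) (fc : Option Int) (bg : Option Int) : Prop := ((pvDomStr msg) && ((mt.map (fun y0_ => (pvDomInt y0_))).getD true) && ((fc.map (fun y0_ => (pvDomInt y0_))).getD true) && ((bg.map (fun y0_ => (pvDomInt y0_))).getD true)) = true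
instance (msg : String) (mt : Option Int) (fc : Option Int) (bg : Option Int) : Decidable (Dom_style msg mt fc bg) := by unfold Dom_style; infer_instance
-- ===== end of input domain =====

-- B replaces A's length-keyed template table and intermediate code list with a single
-- string-accumulator pass over the three codes (simpler decomposition, same cost).


-- ===== PORT A =====
-- `code = [x for x in [mt, fc, bg] if x != None and x != 0]`
def styleFilter (xs : List (Option Int)) : List Int :=
  xs.filterMap (fun x => match x with
    | some v => if v ≠ 0 then some v else none
    | none => none)

-- `switch.get(code_len).format(*code)`; code always has ≤ 3 elements, so the
-- table lookup always succeeds (the `_ => ""` arm is unreachable).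
def styleSwitch (code : List Int) : String :=
  match code with
  | [] => ""
  | [a] => PySem.Int.toStr a ++ "m"
  | [a, b] => PySem.Int.toStr a ++ ";" ++ PySem.Int.toStr b ++ "m"
  | [a, b, c] => PySem.Int.toStr a ++ ";" ++ PySem.Int.toStr b ++ ";" ++ PySem.Int.toStr c ++ "m"
  | _ => ""

def style (msg : String) (mt : Option Int) (fc : Option Int) (bg : Option Int) : String :=
  let code := styleFilter [mt, fc, bg]
  let code_f := styleSwitch code
  "\x1b[" ++ code_f ++ msg ++ "\x1b[0m"

-- ===== PORT B =====
-- one step of B's accumulator loop body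
def styleStep (parts : String) (x : Option Int) : String :=
  match x with
  | some v => if v ≠ 0 then parts ++ (if parts ≠ "" then ";" else "") ++ PySem.Int.toStr v else parts
  | none => parts

def style_alt (msg : String) (mt : Option Int) (fc : Option Int) (bg : Option Int) : String :=
  let parts := [mt, fc, bg].foldl styleStep ""
  let code_f := if parts ≠ "" then parts ++ "m" else ""
  "\x1b[" ++ code_f ++ msg ++ "\x1b[0m"

-- ===== PRECONDITION & SPEC =====
def Spec_style (msg : String) (mt : Option Int) (fc : Option Int) (bg : Option Int) (out : String) : Prop := out = style_alt msg mt fc bg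
instance (msg : String) (mt : Option Int) (fc : Option Int) (bg : Option Int) (out : String) : Decidable (Spec_style msg mt fc bg out) := by unfold Spec_style; infer_instance

-- ===== CLAIM (what is proved, stated in full; the proofs are below) =====
def Claim_equal_style : Prop := ∀ (msg : String) (mt : Option Int) (fc : Option Int) (bg : Option Int), Dom_style msg mt fc bg → Spec_style msg mt fc bg (style msg mt fc bg)

-- ===== LEMMAS AND PROOFS =====

theorem toDigitsCore_ne_nil (b fuel n : Nat) (acc : List Char) (hacc : acc ≠ []) :
    Nat.toDigitsCore b fuel n acc ≠ [] := by
  induction fuel generalizing n acc with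
  | zero => simpa [Nat.toDigitsCore] using hacc
  | succ f ih =>
    rw [Nat.toDigitsCore]
    split
    · simp
    · exact ih _ _ (by simp)

theorem toDigits_ne_nil (b n : Nat) : Nat.toDigits b n ≠ [] := by
  unfold Nat.toDigits
  rw [Nat.toDigitsCore]
  split
  · simp
  · exact toDigitsCore_ne_nil b n _ _ (by simp)

theorem toStr_ne_empty (v : Int) : PySem.Int.toStr v ≠ "" := by
  intro h
  have h2 := congrArg String.toList h
  rw [PySem.Int.toList_toStr] at h2
  unfold PySem.Int.toChars at h2
  split at h2
  · simp at h2
  · simp at h2; exact toDigits_ne_nil 10 _ h2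

theorem append_ne_empty_of_right (s t : String) (ht : t ≠ "") : s ++ t ≠ "" := by
  intro h
  have h2 := congrArg String.toList h
  simp at h2
  exact ht (by
    have := h2.2
    cases t
    simp_all)

theorem style_spec : Claim_equal_style := by
  intro msg mt fc bg _
  unfold Spec_style style style_alt styleFilter styleSwitch styleStep
  rcases mt with _ | a <;> rcases fc with _ | b <;> rcases bg with _ | c <;>
    simp only [List.filterMap, List.foldl] <;>
    split_ifs <;>
    simp_all [String.append_assoc, toStr_ne_empty,
      append_ne_empty_of_right _ _ (toStr_ne_empty _)]
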